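-- pv_equiv track=rewrite | github.com/MorsUltra/NEA | GUI/menu.py | word_cropper
-- ===== SOURCE A (Python) =====
-- def word_cropper(string, seperator=" ", word_count=1):
--     count = 0
--     for i, char in enumerate(string):
--         if char == seperator:
--             count += 1
--             if count == word_count:
--                 return i
--     return
-- ===== SOURCE B (Python) =====
-- def word_cropper(string, seperator=" ", word_count=1):
--     positions = [i for i, char in enumerate(string) if char == seperator]
--     if 1 <= word_count <= len(positions):
--         return positions[word_count - 1]
--     return None
-- ===== Notes on version B (the rewrite author's own statement) =====
-- stated objective: alternative
-- what changed: B replaces A's early-returning counting scan with a full one-pass table of all separator positions followed by a bounds-checked selection of the word_count-th one.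
import Mathlib
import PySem

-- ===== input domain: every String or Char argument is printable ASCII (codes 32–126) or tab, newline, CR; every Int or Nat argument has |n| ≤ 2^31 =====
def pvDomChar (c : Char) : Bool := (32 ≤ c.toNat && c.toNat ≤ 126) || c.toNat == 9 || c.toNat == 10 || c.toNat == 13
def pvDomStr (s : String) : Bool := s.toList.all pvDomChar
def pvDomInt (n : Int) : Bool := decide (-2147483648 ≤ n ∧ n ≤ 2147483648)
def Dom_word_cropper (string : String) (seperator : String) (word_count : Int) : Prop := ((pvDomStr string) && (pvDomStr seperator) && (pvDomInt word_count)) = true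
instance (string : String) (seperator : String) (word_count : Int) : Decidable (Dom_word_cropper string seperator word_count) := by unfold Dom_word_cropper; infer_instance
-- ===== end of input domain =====

-- B scans once building the full list of separator positions, then selects the word_count-th with a bounds check (alternative decomposition; same O(n) cost; return-value equivalence only).
-- ===== PORT A =====
-- A's for-loop with early return: structural recursion over the characters carrying the running index i and count.
def wcLoop (seperator : String) (word_count : Int) : List Char → Int → Int → Option Int
  | [], _, _ => none
  | c :: rest, i, count =>
    if String.mk [c] = seperator then
      if count + 1 = word_count then some i
      else wcLoop seperator word_count rest (i + 1) (count + 1)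
    else wcLoop seperator word_count rest (i + 1) count

def word_cropper (string : String) (seperator : String) (word_count : Int) : Option Int :=
  wcLoop seperator word_count string.toList 0 0

-- ===== PORT B =====
-- the comprehension [i for i, char in enumerate(string) if char == seperator]
def wcPositions (seperator : String) (string : String) : List Int :=
  (PySem.List.enumerate string.toList 0).filterMap
    (fun p => if String.mk [p.2] = seperator then some p.1 else none)

def word_cropper_alt (string : String) (seperator : String) (word_count : Int) : Option Int :=
  let positions := wcPositions seperator string
  if 1 ≤ word_count ∧ word_count ≤ positions.length then
    PySem.List.pyGet? positions (word_count - 1)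
  else none

-- ===== PRECONDITION & SPEC =====
def Spec_word_cropper (string : String) (seperator : String) (word_count : Int) (out : Option Int) : Prop := out = word_cropper_alt string seperator word_count
instance (string : String) (seperator : String) (word_count : Int) (out : Option Int) : Decidable (Spec_word_cropper string seperator word_count out) := by unfold Spec_word_cropper; infer_instance

-- ===== CLAIM (what is proved, stated in full; the proofs are below) =====
def Claim_equal_word_cropper : Prop := ∀ (string : String) (seperator : String) (word_count : Int), Dom_word_cropper string seperator word_count → Spec_word_cropper string seperator word_count (word_cropper string seperator word_count)

-- ===== LEMMAS AND PROOFS =====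

-- ===== VERDICT (by name: the statement is the Claim_ definition above) =====
-- selection step, abstracted over the remaining target count
def wcSel (ps : List Int) (k : Int) : Option Int :=
  if 1 ≤ k ∧ k ≤ ps.length then PySem.List.pyGet? ps (k - 1) else none

-- positions of the suffix l when enumeration starts at s
def wcPos (seperator : String) (l : List Char) (s : Int) : List Int :=
  (PySem.List.enumerate l s).filterMap
    (fun p => if String.mk [p.2] = seperator then some p.1 else none)

theorem wcPos_nil (sep : String) (s : Int) : wcPos sep [] s = [] := by
  simp [wcPos, PySem.List.enumerate_nil]

theorem wcPos_cons (sep : String) (c : Char) (l : List Char) (s : Int) :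
    wcPos sep (c :: l) s =
      (if String.mk [c] = sep then [s] else []) ++ wcPos sep l (s + 1) := by
  simp only [wcPos, PySem.List.enumerate_cons, List.filterMap_cons]
  split_ifs <;> simp

theorem wcSel_cons (p : Int) (ps : List Int) (k : Int) :
    wcSel (p :: ps) k = if k = 1 then some p else wcSel ps (k - 1) := by
  unfold wcSel
  by_cases h1 : k = 1
  · subst h1; simp [PySem.List.pyGet?_zero_cons]
  · simp only [if_neg h1]
    by_cases h2 : 1 ≤ k ∧ k ≤ (p :: ps).length
    · have hk : 2 ≤ k := by rcases h2 with ⟨ha, _⟩; omega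
      rw [if_pos h2, if_pos (by simp at h2 ⊢; omega)]
      have : k - 1 = ((k - 2).toNat : Int) + 1 := by omega
      rw [this, PySem.List.pyGet?_cons_succ]
      congr 1
      omega
    · rw [if_neg h2, if_neg (by simp at h2 ⊢; omega)]

theorem wcLoop_eq_sel (sep : String) (wc : Int) :
    ∀ (l : List Char) (i count : Int),
      wcLoop sep wc l i count = wcSel (wcPos sep l i) (wc - count) := by
  intro l
  induction l with
  | nil => intro i count; simp [wcLoop, wcPos_nil, wcSel]; omega
  | cons c rest ih =>
    intro i count
    rw [wcPos_cons]
    by_cases hc : String.mk [c] = sep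
    · simp only [wcLoop, if_pos hc, List.cons_append, List.nil_append, wcSel_cons]
      by_cases he : count + 1 = wc
      · rw [if_pos he, if_pos (show wc - count = 1 by omega)]
      · rw [if_neg he, if_neg (show ¬ wc - count = 1 by omega), ih]
        congr 1
        omega
    · simp only [wcLoop, if_neg hc, List.nil_append, ih]

theorem word_cropper_spec : Claim_equal_word_cropper := by
  intro string seperator word_count _
  unfold Spec_word_cropper word_cropper word_cropper_alt
  rw [wcLoop_eq_sel]
  show wcSel (wcPos seperator string.toList 0) (word_count - 0) = _
  simp only [Int.sub_zero]
  rfl
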